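-- pv_equiv track=rewrite | github.com/androidx/androidx | development/build_log_simplifier.py | shorten_uninteresting_stack_frames
-- ===== SOURCE A (Python) =====
-- def shorten_uninteresting_stack_frames(lines):
--     result = []
--     prev_line_is_boring = False
--     for line in lines:
--         if line.startswith("\tat org.gradle"):
--             if not prev_line_is_boring:
--                 result.append("\tat org.gradle...\n")
--             prev_line_is_boring = True
--         elif line.startswith("\tat java.base"):
--             if not prev_line_is_boring:
--                 result.append("\tat java.base...")
--             prev_line_is_boring = True
--         else:
--             result.append(line)
--             prev_line_is_boring = False
--     return result
-- ===== SOURCE B (Python) =====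
-- from itertools import groupby
--
-- def _is_boring(line):
--     return line.startswith("\tat org.gradle") or line.startswith("\tat java.base")
--
-- def shorten_uninteresting_stack_frames(lines):
--     result = []
--     for boring, group in groupby(lines, key=_is_boring):
--         if boring:
--             first = next(group)
--             if first.startswith("\tat org.gradle"):
--                 result.append("\tat org.gradle...\n")
--             else:
--                 result.append("\tat java.base...")
--         else:
--             result.extend(group)
--     return result
-- ===== Notes on version B (the rewrite author's own statement) =====
-- stated objective: idiomatic
-- what changed: Replaces the per-line prev_line_is_boring flag with itertools.groupby over a boringness predicate: each maximal run of boring lines is collapsed at once into a marker chosen from the run's first line.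
import Mathlib
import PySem

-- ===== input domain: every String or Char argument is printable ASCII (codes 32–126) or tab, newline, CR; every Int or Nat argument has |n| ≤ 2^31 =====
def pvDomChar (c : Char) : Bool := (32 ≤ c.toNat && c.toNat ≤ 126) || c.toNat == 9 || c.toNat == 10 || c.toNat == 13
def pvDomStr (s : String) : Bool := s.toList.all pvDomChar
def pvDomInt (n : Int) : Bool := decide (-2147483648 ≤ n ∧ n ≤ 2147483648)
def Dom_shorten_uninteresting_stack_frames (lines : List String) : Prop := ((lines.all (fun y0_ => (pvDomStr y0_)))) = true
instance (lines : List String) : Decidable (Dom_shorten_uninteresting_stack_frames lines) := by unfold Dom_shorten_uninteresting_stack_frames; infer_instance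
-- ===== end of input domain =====

-- B collapses each maximal run of boring stack-frame lines via a groupby-style grouping pass instead of A's running boolean flag (objective: idiomatic).


-- ===== PORT A =====
-- transliteration of A's loop: state (result, prev_line_is_boring)
def shortenLoopA : List String → List String → Bool → List String
  | [], res, _ => res
  | line :: rest, res, prev =>
    if PySem.Str.startswith line "\tat org.gradle" then
      shortenLoopA rest (if ¬ prev then res ++ ["\tat org.gradle...\n"] else res) true
    else if PySem.Str.startswith line "\tat java.base" then
      shortenLoopA rest (if ¬ prev then res ++ ["\tat java.base..."] else res) true
    else
      shortenLoopA rest (res ++ [line]) false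

def shorten_uninteresting_stack_frames (lines : List String) : List String :=
  shortenLoopA lines [] false

-- ===== PORT B =====
-- B: groupby over the boringness predicate; each boring run becomes one marker
def pyIsBoring (line : String) : Bool :=
  PySem.Str.startswith line "\tat org.gradle" || PySem.Str.startswith line "\tat java.base"

def shortenGroups : List String → List String
  | [] => []
  | line :: rest =>
    if pyIsBoring line then
      (if PySem.Str.startswith line "\tat org.gradle" then "\tat org.gradle...\n"
       else "\tat java.base...") :: shortenGroups (rest.dropWhile pyIsBoring)
    else
      line :: shortenGroups rest
termination_by l => l.length
decreasing_by
  · exact Nat.lt_succ_of_le (List.length_dropWhile_le _ _)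
  · simp

def shorten_uninteresting_stack_frames_alt (lines : List String) : List String :=
  shortenGroups lines

-- ===== PRECONDITION & SPEC =====
def Spec_shorten_uninteresting_stack_frames (lines : List String) (out : List String) : Prop := out = shorten_uninteresting_stack_frames_alt lines
instance (lines : List String) (out : List String) : Decidable (Spec_shorten_uninteresting_stack_frames lines out) := by unfold Spec_shorten_uninteresting_stack_frames; infer_instance

-- ===== CLAIM (what is proved, stated in full; the proofs are below) =====
def Claim_equal_shorten_uninteresting_stack_frames : Prop := ∀ (lines : List String), Dom_shorten_uninteresting_stack_frames lines → Spec_shorten_uninteresting_stack_frames lines (shorten_uninteresting_stack_frames lines)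

-- ===== LEMMAS AND PROOFS =====


theorem shortenLoopA_eq (lines : List String) :
    ∀ res : List String,
      shortenLoopA lines res true = res ++ shortenGroups (lines.dropWhile pyIsBoring) ∧
      shortenLoopA lines res false = res ++ shortenGroups lines := by
  induction lines with
  | nil => intro res; simp [shortenLoopA, shortenGroups]
  | cons line rest ih =>
      intro res
      by_cases hgr : PySem.Str.startswith line "\tat org.gradle" = true
      · simp at hgr
        have hb : pyIsBoring line = true := by simp [pyIsBoring, hgr]
        constructor
        · simp [shortenLoopA, hgr, List.dropWhile, hb, (ih res).1]
        · simp [shortenLoopA, hgr, shortenGroups, hb,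
            (ih (res ++ ["\tat org.gradle...\n"])).1]
      · by_cases hjb : PySem.Str.startswith line "\tat java.base" = true
        · simp at hgr hjb
          have hb : pyIsBoring line = true := by simp [pyIsBoring, hjb]
          constructor
          · simp [shortenLoopA, hgr, hjb, List.dropWhile, hb, (ih res).1]
          · simp [shortenLoopA, hgr, hjb, shortenGroups, hb,
              (ih (res ++ ["\tat java.base..."])).1]
        · have hb : pyIsBoring line = false := by
            simp [pyIsBoring]
            exact ⟨by simpa using hgr, by simpa using hjb⟩
          simp at hgr hjb
          constructor
          · simp [shortenLoopA, hgr, hjb, List.dropWhile, hb, shortenGroups,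
              (ih (res ++ [line])).2]
          · simp [shortenLoopA, hgr, hjb, shortenGroups, hb, (ih (res ++ [line])).2]

-- ===== VERDICT (by name: the statement is the Claim_ definition above) =====
theorem shorten_uninteresting_stack_frames_spec : Claim_equal_shorten_uninteresting_stack_frames := by
  intro lines _
  show _ = _
  simpa [shorten_uninteresting_stack_frames, shorten_uninteresting_stack_frames_alt]
    using (shortenLoopA_eq lines []).2
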